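-- pv_equiv track=rewrite | github.com/Okm165/Sonality | sonality/ess.py | _default_severity
-- ===== SOURCE A (Python) =====
-- from typing import Any, Final, Literal, cast
--
-- DefaultSeverity = Literal["none", "coercion", "missing", "exception"]
--
-- MISSING_FIELD_PREFIX: Final = "missing:"
--
-- COERCED_FIELD_PREFIX: Final = "coerced:"
--
-- CLASSIFIER_EXCEPTION_FIELD: Final = f"{MISSING_FIELD_PREFIX}classifier_exception"
--
-- def _default_severity(defaulted_fields: tuple[str, ...]) -> DefaultSeverity:
--     """Collapse field-level defaults into a single severity bucket."""
--     if CLASSIFIER_EXCEPTION_FIELD in defaulted_fields: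
--         return "exception"
--     if any(field.startswith(MISSING_FIELD_PREFIX) for field in defaulted_fields):
--         return "missing"
--     if any(field.startswith(COERCED_FIELD_PREFIX) for field in defaulted_fields):
--         return "coercion"
--     return "none"
-- ===== SOURCE B (Python) =====
-- from typing import Final, Literal
--
-- DefaultSeverity = Literal["none", "coercion", "missing", "exception"]
--
-- MISSING_FIELD_PREFIX: Final = "missing:"
-- COERCED_FIELD_PREFIX: Final = "coerced:"
-- CLASSIFIER_EXCEPTION_FIELD: Final = f"{MISSING_FIELD_PREFIX}classifier_exception"
--
--
-- def _default_severity(defaulted_fields: tuple[str, ...]) -> DefaultSeverity: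
--     """Collapse field-level defaults into a single severity bucket (single pass)."""
--     has_exception = False
--     has_missing = False
--     has_coercion = False
--     for field in defaulted_fields:
--         if field == CLASSIFIER_EXCEPTION_FIELD:
--             has_exception = True
--         if field.startswith(MISSING_FIELD_PREFIX):
--             has_missing = True
--         if field.startswith(COERCED_FIELD_PREFIX):
--             has_coercion = True
--     if has_exception:
--         return "exception"
--     if has_missing:
--         return "missing"
--     if has_coercion:
--         return "coercion"
--     return "none"
-- ===== Notes on version B (the rewrite author's own statement) =====
-- stated objective: alternative
-- what changed: Replaced A's three separate short-circuiting scans (membership test plus two any() generator passes) by a single accumulating loop over the fields that records three boolean flags, followed by one priority decision.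
import Mathlib
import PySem

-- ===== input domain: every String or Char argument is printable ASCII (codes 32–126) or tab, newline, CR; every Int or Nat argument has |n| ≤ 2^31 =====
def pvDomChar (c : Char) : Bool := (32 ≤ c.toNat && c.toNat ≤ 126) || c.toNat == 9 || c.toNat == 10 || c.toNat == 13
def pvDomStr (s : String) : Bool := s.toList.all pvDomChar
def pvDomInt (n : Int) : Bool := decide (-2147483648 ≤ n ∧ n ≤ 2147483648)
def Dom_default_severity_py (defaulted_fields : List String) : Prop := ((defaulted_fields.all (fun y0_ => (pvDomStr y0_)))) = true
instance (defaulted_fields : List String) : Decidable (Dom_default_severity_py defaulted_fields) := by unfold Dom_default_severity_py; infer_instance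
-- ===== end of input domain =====

-- B differs from A by one flag-accumulating pass instead of three short-circuiting scans; objective: alternative decomposition (same cost).

-- ===== PORT A =====
def pvMissingPrefix : String := "missing:"
def pvCoercedPrefix : String := "coerced:"
def pvClassifierExceptionField : String := "missing:classifier_exception"

-- 'CLASSIFIER_EXCEPTION_FIELD in defaulted_fields' / the two any(...) generator scans
def default_severity_py (defaulted_fields : List String) : String :=
  if defaulted_fields.contains pvClassifierExceptionField then "exception"
  else if defaulted_fields.any (fun field => PySem.Str.startswith field pvMissingPrefix) then "missing"
  else if defaulted_fields.any (fun field => PySem.Str.startswith field pvCoercedPrefix) then "coercion"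
  else "none"

-- ===== PORT B =====
-- single loop accumulating three flags, then one priority decision
def default_severity_py_alt (defaulted_fields : List String) : String :=
  let flags := defaulted_fields.foldl
    (fun (st : Bool × Bool × Bool) field =>
      (if field == pvClassifierExceptionField then true else st.1,
       if PySem.Str.startswith field pvMissingPrefix then true else st.2.1,
       if PySem.Str.startswith field pvCoercedPrefix then true else st.2.2))
    (false, false, false)
  if flags.1 then "exception"
  else if flags.2.1 then "missing"
  else if flags.2.2 then "coercion"
  else "none"

-- ===== PRECONDITION & SPEC =====
def Spec_default_severity_py (defaulted_fields : List String) (out : String) : Prop := out = default_severity_py_alt defaulted_fields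
instance (defaulted_fields : List String) (out : String) : Decidable (Spec_default_severity_py defaulted_fields out) := by unfold Spec_default_severity_py; infer_instance

-- ===== CLAIM (what is proved, stated in full; the proofs are below) =====
def Claim_equal_default_severity_py : Prop := ∀ (defaulted_fields : List String), Dom_default_severity_py defaulted_fields → Spec_default_severity_py defaulted_fields (default_severity_py defaulted_fields)

-- ===== LEMMAS AND PROOFS =====

-- the folded flags are exactly the three 'any' scans (or-ed with the initial flags)
theorem flags_eq (xs : List String) (a b c : Bool) :
    xs.foldl
      (fun (st : Bool × Bool × Bool) field =>
        (if field == pvClassifierExceptionField then true else st.1,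
         if PySem.Str.startswith field pvMissingPrefix then true else st.2.1,
         if PySem.Str.startswith field pvCoercedPrefix then true else st.2.2))
      (a, b, c)
    = (a || xs.contains pvClassifierExceptionField,
       b || xs.any (fun field => PySem.Str.startswith field pvMissingPrefix),
       c || xs.any (fun field => PySem.Str.startswith field pvCoercedPrefix)) := by
  induction xs generalizing a b c with
  | nil => simp
  | cons x xs ih =>
      simp only [List.foldl_cons, ih, List.contains_cons, List.any_cons]
      congr 1
      · cases h : (x == pvClassifierExceptionField) with
        | false =>
            have h' : pvClassifierExceptionField ≠ x := fun e => by simp [e] at h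
            simp [beq_eq_false_iff_ne.mpr h']
        | true =>
            have h' : pvClassifierExceptionField = x := (beq_iff_eq.mp h).symm
            simp [h']
      · congr 1
        · cases h : PySem.Str.startswith x pvMissingPrefix <;> simp [h]
        · cases h : PySem.Str.startswith x pvCoercedPrefix <;> simp [h]

-- ===== VERDICT (by name: the statement is the Claim_ definition above) =====
theorem default_severity_py_spec : Claim_equal_default_severity_py := by
  intro xs _
  unfold Spec_default_severity_py default_severity_py default_severity_py_alt
  simp only [flags_eq, Bool.false_or]
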